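-- pv_equiv track=rewrite | github.com/danielepusceddu/fditools | algorithms.py | italianToBuglisi
-- ===== SOURCE A (Python) =====
-- def italianToBuglisi(italian: str):
--     translation = {'p': 'b', 't': 'd', 'q': 'g', 'z': 'zz'}
--     result = italian
--     for t in translation:
--         result = result.replace(t, translation[t])
--         result = result.replace(t.upper(), translation[t].upper())
--     result = result.replace('z', 'Z')
--
--     return result
-- ===== SOURCE B (Python) =====
-- def italianToBuglisi(italian: str):
--     table = {'p': 'b', 'P': 'B', 't': 'd', 'T': 'D',
--              'q': 'g', 'Q': 'G', 'z': 'ZZ', 'Z': 'ZZ'}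
--     return ''.join(table.get(c, c) for c in italian)
-- ===== Notes on version B (the rewrite author's own statement) =====
-- stated objective: idiomatic
-- what changed: Replaced five sequential whole-string replace passes (plus a final z->Z pass) by a single pass over the characters with one precomposed per-character table (p->b, P->B, t->d, T->D, q->g, Q->G, z->ZZ, Z->ZZ) joined once.
import Mathlib
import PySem

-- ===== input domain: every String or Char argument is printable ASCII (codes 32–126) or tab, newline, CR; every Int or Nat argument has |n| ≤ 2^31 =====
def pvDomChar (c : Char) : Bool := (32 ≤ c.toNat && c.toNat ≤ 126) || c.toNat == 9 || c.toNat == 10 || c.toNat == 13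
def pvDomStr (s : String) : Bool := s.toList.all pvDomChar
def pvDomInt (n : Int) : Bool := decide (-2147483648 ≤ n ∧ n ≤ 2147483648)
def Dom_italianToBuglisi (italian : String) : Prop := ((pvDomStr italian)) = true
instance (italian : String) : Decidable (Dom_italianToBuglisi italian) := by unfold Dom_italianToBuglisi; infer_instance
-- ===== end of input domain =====

-- B replaces A's five sequential whole-string replace passes by one pass over the
-- characters with a precomposed per-character table (objective: idiomatic single pass).

-- ===== PORT A =====
def italianToBuglisi (italian : String) : String :=
  let translation : PySem.Dict String String :=
    PySem.Dict.ofList [("p", "b"), ("t", "d"), ("q", "g"), ("z", "zz")]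
  let result := italian
  let result := (PySem.Dict.keys translation).foldl (fun result t =>
    let result := PySem.Str.replace result t (PySem.Dict.getD translation t "")
    PySem.Str.replace result (PySem.Str.upper t) (PySem.Str.upper (PySem.Dict.getD translation t ""))) result
  PySem.Str.replace result "z" "Z"

-- ===== PORT B =====
def italianToBuglisi_alt (italian : String) : String :=
  let table : PySem.Dict Char String :=
    PySem.Dict.ofList
      [('p', "b"), ('P', "B"), ('t', "d"), ('T', "D"),
       ('q', "g"), ('Q', "G"), ('z', "ZZ"), ('Z', "ZZ")]
  PySem.Str.join "" (italian.toList.map (fun c => PySem.Dict.getD table c (String.ofList [c])))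

-- ===== PRECONDITION & SPEC =====
def Spec_italianToBuglisi (italian : String) (out : String) : Prop := out = italianToBuglisi_alt italian
instance (italian : String) (out : String) : Decidable (Spec_italianToBuglisi italian out) := by unfold Spec_italianToBuglisi; infer_instance

-- ===== CLAIM (what is proved, stated in full; the proofs are below) =====
def Claim_equal_italianToBuglisi : Prop := ∀ (italian : String), Dom_italianToBuglisi italian → Spec_italianToBuglisi italian (italianToBuglisi italian)

-- ===== LEMMAS AND PROOFS =====

-- single-character substitution as a flatMap
def pvSub (a : Char) (n : List Char) (c : Char) : List Char := if c = a then n else [c]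

theorem replace_go_single (a : Char) (n : List Char) :
    ∀ (l : List Char) (fuel : Nat) (acc : List Char), l.length ≤ fuel →
      PySem.Chars.replace.go [a] n fuel l acc = acc.reverse ++ l.flatMap (pvSub a n) := by
  intro l
  induction l with
  | nil =>
    intro fuel acc _
    rw [PySem.Chars.replace.go.eq_def]
    cases fuel <;> simp
  | cons c t ih =>
    intro fuel acc hle
    cases fuel with
    | zero => simp at hle
    | succ fuel =>
      rw [PySem.Chars.replace.go.eq_def]
      dsimp only
      have hp : ([a].isPrefixOf (c :: t)) = (a == c) := by
        simp [List.isPrefixOf]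
      rw [hp]
      have ht : t.length ≤ fuel := by simpa using hle
      by_cases h : a = c
      · rw [if_pos (by simp [h])]
        rw [show List.drop ([a].length) (c :: t) = t from rfl]
        rw [ih _ _ ht]
        simp [pvSub, h]
      · rw [if_neg (by simp [h]), ih _ _ ht]
        simp [pvSub, Ne.symm h]

theorem replace_single (s : List Char) (a : Char) (n : List Char) :
    PySem.Chars.replace s [a] n = s.flatMap (pvSub a n) := by
  rw [PySem.Chars.replace]
  rw [if_neg (by simp)]
  simpa using replace_go_single a n s s.length [] le_rfl

-- the net per-character effect of A's nine passes, as B's table lookup computes it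
def pvTableB (c : Char) : List Char :=
  (PySem.Dict.getD
    (PySem.Dict.ofList
      [('p', "b"), ('P', "B"), ('t', "d"), ('T', "D"),
       ('q', "g"), ('Q', "G"), ('z', "ZZ"), ('Z', "ZZ")] : PySem.Dict Char String)
    c (String.ofList [c])).toList

theorem compose_char (c : Char) :
    List.flatMap
      (fun x =>
        List.flatMap
          (fun x =>
            List.flatMap
              (fun x =>
                List.flatMap
                  (fun x =>
                    List.flatMap
                      (fun x =>
                        List.flatMap
                          (fun x =>
                            List.flatMap (fun x => List.flatMap (pvSub 'z' ['Z']) (pvSub 'Z' ['Z', 'Z'] x))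
                              (pvSub 'z' ['z', 'z'] x))
                          (pvSub 'Q' ['G'] x))
                      (pvSub 'q' ['g'] x))
                  (pvSub 'T' ['D'] x))
              (pvSub 't' ['d'] x))
          (pvSub 'P' ['B'] x))
      (pvSub 'p' ['b'] c) = pvTableB c := by
  by_cases h1 : c = 'p'; · subst h1; rfl
  by_cases h2 : c = 'P'; · subst h2; rfl
  by_cases h3 : c = 't'; · subst h3; rfl
  by_cases h4 : c = 'T'; · subst h4; rfl
  by_cases h5 : c = 'q'; · subst h5; rfl
  by_cases h6 : c = 'Q'; · subst h6; rfl
  by_cases h7 : c = 'z'; · subst h7; rfl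
  by_cases h8 : c = 'Z'; · subst h8; rfl
  have hd : (PySem.Dict.ofList
      [('p', "b"), ('P', "B"), ('t', "d"), ('T', "D"),
       ('q', "g"), ('Q', "G"), ('z', "ZZ"), ('Z', "ZZ")] : PySem.Dict Char String)
      = PySem.Dict.mk [('p', "b"), ('P', "B"), ('t', "d"), ('T', "D"),
       ('q', "g"), ('Q', "G"), ('z', "ZZ"), ('Z', "ZZ")] := rfl
  have b1 : ('p' == c) = false := by simp [Ne.symm h1]
  have b2 : ('P' == c) = false := by simp [Ne.symm h2]
  have b3 : ('t' == c) = false := by simp [Ne.symm h3]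
  have b4 : ('T' == c) = false := by simp [Ne.symm h4]
  have b5 : ('q' == c) = false := by simp [Ne.symm h5]
  have b6 : ('Q' == c) = false := by simp [Ne.symm h6]
  have b7 : ('z' == c) = false := by simp [Ne.symm h7]
  have b8 : ('Z' == c) = false := by simp [Ne.symm h8]
  simp [pvSub, pvTableB, hd, PySem.Dict.getD, PySem.Dict.get?, List.find?,
        h1, h2, h3, h4, h5, h6, h7, h8, b1, b2, b3, b4, b5, b6, b7, b8]

set_option maxHeartbeats 1000000 in
theorem toList_A (italian : String) :
    (italianToBuglisi italian).toList = italian.toList.flatMap pvTableB := by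
  have hA : italianToBuglisi italian =
      PySem.Str.replace (PySem.Str.replace (PySem.Str.replace (PySem.Str.replace
        (PySem.Str.replace (PySem.Str.replace (PySem.Str.replace (PySem.Str.replace
          (PySem.Str.replace italian "p" "b") "P" "B") "t" "d") "T" "D") "q" "g")
          "Q" "G") "z" "zz") "Z" "ZZ") "z" "Z" := rfl
  rw [hA]
  simp only [PySem.Str.toList_replace]
  rw [show ("p" : String).toList = ['p'] from rfl, show ("b" : String).toList = ['b'] from rfl,
      show ("P" : String).toList = ['P'] from rfl, show ("B" : String).toList = ['B'] from rfl,
      show ("t" : String).toList = ['t'] from rfl, show ("d" : String).toList = ['d'] from rfl,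
      show ("T" : String).toList = ['T'] from rfl, show ("D" : String).toList = ['D'] from rfl,
      show ("q" : String).toList = ['q'] from rfl, show ("g" : String).toList = ['g'] from rfl,
      show ("Q" : String).toList = ['Q'] from rfl, show ("G" : String).toList = ['G'] from rfl,
      show ("z" : String).toList = ['z'] from rfl, show ("zz" : String).toList = ['z','z'] from rfl,
      show ("Z" : String).toList = ['Z'] from rfl, show ("ZZ" : String).toList = ['Z','Z'] from rfl]
  rw [replace_single, replace_single, replace_single, replace_single, replace_single,
      replace_single, replace_single, replace_single, replace_single]
  simp only [List.flatMap_assoc]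
  refine List.flatMap_congr ?_
  intro c _
  exact compose_char c

theorem flatten_intersperse_nil : ∀ (l : List (List Char)),
    (List.intersperse ([] : List Char) l).flatten = l.flatten
  | [] => rfl
  | [a] => rfl
  | a :: b :: t => by
      have h : List.intersperse ([] : List Char) (a :: b :: t)
          = a :: [] :: List.intersperse [] (b :: t) := by simp [List.intersperse]
      rw [h]
      simp [flatten_intersperse_nil (b :: t)]

theorem toList_B (italian : String) :
    (italianToBuglisi_alt italian).toList = italian.toList.flatMap pvTableB := by
  unfold italianToBuglisi_alt
  rw [PySem.Str.toList_join]
  rw [show ("" : String).toList = [] from rfl]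
  simp only [PySem.Chars.join, List.intercalate, flatten_intersperse_nil, List.map_map]
  rw [List.flatMap]
  rfl

-- ===== VERDICT (by name: the statement is the Claim_ definition above) =====
theorem italianToBuglisi_spec : Claim_equal_italianToBuglisi := by
  intro italian _
  unfold Spec_italianToBuglisi
  have := (toList_A italian).trans (toList_B italian).symm
  exact String.toList_injective this
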